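-- pv_equiv track=rewrite | github.com/SimonPurdie/geoff | src/geoff/config_manager.py | _resolve_base_prompt_strings
-- ===== SOURCE A (Python) =====
-- from typing import Any, Dict, Set
--
-- BASE_PROMPT_STRING_KEYS: Set[str] = {
--     "prompt_backpressure_header",
--     "prompt_backpressure_lines",
--     "prompt_breadcrumb_instruction",
--     "prompt_tasklist_study",
--     "prompt_tasklist_update",
-- }
--
-- def _resolve_base_prompt_strings(
--
--     user_conf: Dict[str, Any],
--     repo_conf: Dict[str, Any],
--     defaults_dict: Dict[str, Any],
-- ) -> Dict[str, Any]:
--     result = {}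
--     for key in BASE_PROMPT_STRING_KEYS:
--         if key in user_conf:
--             result[key] = user_conf[key]
--         elif key in repo_conf:
--             result[key] = repo_conf[key]
--         else:
--             result[key] = defaults_dict[key]
--     return result
-- ===== SOURCE B (Python) =====
-- BASE_PROMPT_STRING_KEYS = {
--     "prompt_backpressure_header",
--     "prompt_backpressure_lines",
--     "prompt_breadcrumb_instruction",
--     "prompt_tasklist_study",
--     "prompt_tasklist_update",
-- }
--
-- def _resolve_base_prompt_strings(user_conf, repo_conf, defaults_dict):
--     merged = {**defaults_dict, **repo_conf, **user_conf}
--     return {key: merged[key] for key in BASE_PROMPT_STRING_KEYS}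
-- ===== Notes on version B (the rewrite author's own statement) =====
-- stated objective: simpler
-- what changed: B replaces the per-key if/elif/else priority branching with a single merge pass ({**defaults, **repo, **user}) followed by a plain selection comprehension over the required keys.
import Mathlib
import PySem

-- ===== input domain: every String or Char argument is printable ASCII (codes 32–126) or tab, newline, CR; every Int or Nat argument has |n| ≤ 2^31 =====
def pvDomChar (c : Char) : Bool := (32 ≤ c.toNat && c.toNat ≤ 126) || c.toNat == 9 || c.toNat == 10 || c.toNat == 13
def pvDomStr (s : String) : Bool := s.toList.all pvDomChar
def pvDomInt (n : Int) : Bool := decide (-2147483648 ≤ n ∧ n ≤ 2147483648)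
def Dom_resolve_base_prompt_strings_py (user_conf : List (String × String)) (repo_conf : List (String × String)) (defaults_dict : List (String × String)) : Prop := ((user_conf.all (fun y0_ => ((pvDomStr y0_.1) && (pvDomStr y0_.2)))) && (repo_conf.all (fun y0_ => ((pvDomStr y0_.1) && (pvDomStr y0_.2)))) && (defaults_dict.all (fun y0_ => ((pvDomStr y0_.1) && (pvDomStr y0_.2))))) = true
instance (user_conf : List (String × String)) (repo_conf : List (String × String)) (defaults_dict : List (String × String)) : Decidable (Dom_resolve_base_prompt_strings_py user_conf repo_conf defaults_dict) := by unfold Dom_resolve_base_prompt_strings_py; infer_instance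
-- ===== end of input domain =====

-- B merges the three configs once ({**defaults, **repo, **user}) and then selects the required
-- keys in one pass, replacing A's per-key if/elif/else priority branching (objective: simpler).


-- ===== PORT A =====
-- BASE_PROMPT_STRING_KEYS, iterated in a fixed order (dict outputs are compared ignoring order)
def pvBaseKeys : List String :=
  ["prompt_backpressure_header", "prompt_backpressure_lines", "prompt_breadcrumb_instruction",
   "prompt_tasklist_study", "prompt_tasklist_update"]

-- 'key in conf' / 'conf[key]' on the association-list dict = first-match lookup (List.lookup);
-- the defaults_dict[key] KeyError case (key absent everywhere) is excluded by Pre_, so getD "" is exact there.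
def resolve_base_prompt_strings_py (user_conf : List (String × String)) (repo_conf : List (String × String)) (defaults_dict : List (String × String)) : List (String × String) :=
  (pvBaseKeys.foldl (fun result key =>
      if (List.lookup key user_conf).isSome then
        result.insert key ((List.lookup key user_conf).getD "")
      else if (List.lookup key repo_conf).isSome then
        result.insert key ((List.lookup key repo_conf).getD "")
      else
        result.insert key ((List.lookup key defaults_dict).getD ""))
    PySem.Dict.empty).items

-- ===== PORT B =====
-- merged = {**defaults_dict, **repo_conf, **user_conf}; then one selection pass over the keys.
-- merged[key] would raise exactly where A raises (excluded by Pre_), so getD "" is exact there.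
def resolve_base_prompt_strings_py_alt (user_conf : List (String × String)) (repo_conf : List (String × String)) (defaults_dict : List (String × String)) : List (String × String) :=
  let merged := ((PySem.Dict.ofList defaults_dict).update repo_conf).update user_conf
  (pvBaseKeys.foldl (fun result key => result.insert key (merged.getD key "")) PySem.Dict.empty).items

-- ===== PRECONDITION & SPEC =====
-- Each mapping must have distinct keys (a Python dict cannot carry duplicates, so duplicate-key
-- association lists represent no Python input), and every required key must be present in at
-- least one of the three mappings (otherwise A raises KeyError on defaults_dict[key]).
def Pre_resolve_base_prompt_strings_py (user_conf : List (String × String)) (repo_conf : List (String × String)) (defaults_dict : List (String × String)) : Prop :=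
  (user_conf.map Prod.fst).Nodup ∧ (repo_conf.map Prod.fst).Nodup ∧ (defaults_dict.map Prod.fst).Nodup ∧
  ∀ k ∈ pvBaseKeys, (List.lookup k user_conf).isSome ∨ (List.lookup k repo_conf).isSome ∨ (List.lookup k defaults_dict).isSome
instance (user_conf : List (String × String)) (repo_conf : List (String × String)) (defaults_dict : List (String × String)) : Decidable (Pre_resolve_base_prompt_strings_py user_conf repo_conf defaults_dict) := by unfold Pre_resolve_base_prompt_strings_py; infer_instance

def pvWitness_resolve_base_prompt_strings_py : (List (String × String)) × (List (String × String)) × (List (String × String)) :=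
  ([("prompt_tasklist_study", "s")],
   [("prompt_backpressure_lines", "40")],
   [("prompt_backpressure_header", "h"), ("prompt_backpressure_lines", "l"),
    ("prompt_breadcrumb_instruction", "b"), ("prompt_tasklist_study", "t"),
    ("prompt_tasklist_update", "u")])

def Spec_resolve_base_prompt_strings_py (user_conf : List (String × String)) (repo_conf : List (String × String)) (defaults_dict : List (String × String)) (out : List (String × String)) : Prop := out = resolve_base_prompt_strings_py_alt user_conf repo_conf defaults_dict
instance (user_conf : List (String × String)) (repo_conf : List (String × String)) (defaults_dict : List (String × String)) (out : List (String × String)) : Decidable (Spec_resolve_base_prompt_strings_py user_conf repo_conf defaults_dict out) := by unfold Spec_resolve_base_prompt_strings_py; infer_instance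

-- ===== CLAIM (what is proved, stated in full; the proofs are below) =====
def Claim_equal_resolve_base_prompt_strings_py : Prop := ∀ (user_conf : List (String × String)) (repo_conf : List (String × String)) (defaults_dict : List (String × String)), Dom_resolve_base_prompt_strings_py user_conf repo_conf defaults_dict → Pre_resolve_base_prompt_strings_py user_conf repo_conf defaults_dict → Spec_resolve_base_prompt_strings_py user_conf repo_conf defaults_dict (resolve_base_prompt_strings_py user_conf repo_conf defaults_dict)

-- ===== LEMMAS AND PROOFS =====

-- first-match lookup is none when the key is absent
theorem lookup_eq_none_of_not_mem {l : List (String × String)} {k : String}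
    (h : k ∉ l.map Prod.fst) : List.lookup k l = none := by
  induction l with
  | nil => rfl
  | cons a t ih =>
    simp only [List.map_cons, List.mem_cons, not_or] at h
    have hb : (k == a.1) = false := beq_eq_false_iff_ne.mpr h.1
    simp only [List.lookup, hb]
    exact ih h.2

-- dict update by a duplicate-free pair list: lookup prefers the update
theorem get?_update_nodup (d : PySem.Dict String String) (l : List (String × String))
    (h : (l.map Prod.fst).Nodup) (k : String) :
    (d.update l).get? k = (List.lookup k l).or (d.get? k) := by
  induction l generalizing d with
  | nil => rfl
  | cons a t ih =>
    simp only [List.map_cons, List.nodup_cons] at h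
    show ((d.insert a.1 a.2).update t).get? k = _
    rw [ih _ h.2, PySem.Dict.get?_insert]
    by_cases hk : k = a.1
    · subst hk
      rw [lookup_eq_none_of_not_mem h.1]
      simp [List.lookup]
    · have hb : (k == a.1) = false := beq_eq_false_iff_ne.mpr hk
      simp only [List.lookup, hb, if_neg hk]

-- the value A stores for a key, as one expression
theorem foldA_eq (user_conf repo_conf defaults_dict : List (String × String)) :
    (fun (result : PySem.Dict String String) key =>
      if (List.lookup key user_conf).isSome then
        result.insert key ((List.lookup key user_conf).getD "")
      else if (List.lookup key repo_conf).isSome then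
        result.insert key ((List.lookup key repo_conf).getD "")
      else
        result.insert key ((List.lookup key defaults_dict).getD ""))
    = (fun result key => result.insert key
        (if (List.lookup key user_conf).isSome then (List.lookup key user_conf).getD ""
         else if (List.lookup key repo_conf).isSome then (List.lookup key repo_conf).getD ""
         else (List.lookup key defaults_dict).getD "")) := by
  funext result key
  split_ifs <;> rfl

theorem pvBaseKeys_nodup : pvBaseKeys.Nodup := by decide

-- an insert loop over distinct keys from the empty dict lists exactly those key/value pairs
theorem items_fold_select (v : String → String) (l : List String) (hnd : l.Nodup) :
    (l.foldl (fun (res : PySem.Dict String String) key => res.insert key (v key)) PySem.Dict.empty).items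
      = l.map (fun k => (k, v k)) := by
  simpa using PySem.Dict.items_foldl_insert_fresh l (fun s => s) v PySem.Dict.empty
    (fun a _ => PySem.Dict.contains_empty a) (by simpa using hnd)

-- ===== VERDICT (by name: the statement is the Claim_ definition above) =====
theorem resolve_base_prompt_strings_py_spec : Claim_equal_resolve_base_prompt_strings_py := by
  intro user_conf repo_conf defaults_dict _ hpre
  obtain ⟨hu, hr, hd, _⟩ := hpre
  unfold Spec_resolve_base_prompt_strings_py
  rw [show resolve_base_prompt_strings_py_alt user_conf repo_conf defaults_dict
        = (pvBaseKeys.foldl (fun result key => result.insert key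
            (((((PySem.Dict.ofList defaults_dict).update repo_conf).update user_conf)).getD key ""))
            PySem.Dict.empty).items from rfl]
  unfold resolve_base_prompt_strings_py
  rw [foldA_eq]
  rw [items_fold_select _ _ pvBaseKeys_nodup, items_fold_select _ _ pvBaseKeys_nodup]
  apply List.map_congr_left
  intro k _
  rw [PySem.Dict.getD_eq_get?_getD,
      get?_update_nodup _ _ hu, get?_update_nodup _ _ hr,
      show (PySem.Dict.ofList defaults_dict) = PySem.Dict.empty.update defaults_dict from rfl,
      get?_update_nodup _ _ hd, PySem.Dict.get?_empty]
  cases huk : List.lookup k user_conf <;>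
    cases hrk : List.lookup k repo_conf <;>
    cases hdk : List.lookup k defaults_dict <;> simp [Option.or]
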